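-- pv_equiv track=rewrite | github.com/MartinSavc/SpatialConfNetExt | tensorflowlib/unetkeras.py | calc_unet_padding_size
-- ===== SOURCE A (Python) =====
-- def calc_unet_padding_size(
--         size,
--         n_layers,
--         filter_size,
--         pool_size,
--         ):
--
--     size_padded = size
--
--     # up
--     for l in range(n_layers-1):
--         size_padded += 2*(filter_size-1)
--         if not size_padded%pool_size:
--             size_padded //= pool_size
--             size_padded += 1
--         else:
--             size_padded //= pool_size
--     # middle
--     size_padded += 2*(filter_size-1)
--
--     # down
--     for l in range(n_layers-1):
--         size_padded *= 2
--         size_padded += 2*(filter_size-1)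
--
--     # adjust the size, so that the decimation leaves no remainder
--     decimation_factor = pool_size**(n_layers-1)
--     decimation_fraction = size_padded//decimation_factor
--     decimation_remainder = size_padded%decimation_factor
--     if decimation_remainder != 0:
--         size_padded = (decimation_fraction+1)*decimation_factor
--
--     start = (size_padded-size)//2
--     end = size_padded-(start+size)
--     return start, end
-- ===== SOURCE B (Python) =====
-- def calc_unet_padding_size(
--         size,
--         n_layers,
--         filter_size,
--         pool_size,
--         ):
--     k = n_layers - 1
--     pad = 2 * (filter_size - 1)
--
--     # contracting path: the divisibility branch prevents a closed form
--     s = size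
--     for _ in range(k):
--         t = s + pad
--         s = t // pool_size + (1 if t % pool_size == 0 else 0)
--
--     # middle + expanding path in closed form: k doublings of (s+pad), each followed by +pad
--     factor = 2 ** k
--     s = (s + pad) * factor + pad * (factor - 1)
--
--     # round up to the next multiple of the decimation factor (ceiling division)
--     d = pool_size ** k
--     s = -(-s // d) * d
--
--     start = (s - size) // 2
--     return start, s - size - start
-- ===== Notes on version B (the rewrite author's own statement) =====
-- stated objective: simpler
-- what changed: The middle step and the n_layers-1 doublings of the expanding ('down') loop are replaced by one exact closed form (s+pad)*2^k + pad*(2^k-1), and the remainder-tested rounding branch by a branch-free ceiling division -(-s//d)*d; only the contracting loop (whose divisibility branch admits no closed form) remains a loop.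
-- outside the precondition, e.g. on calc_unet_padding_size(5, 0, 3, 2): A returns (2, 2), B returns (-2.0, -0.5); on calc_unet_padding_size(5, 2, 3, 0): A raises ZeroDivisionError, B raises ZeroDivisionError
import Mathlib
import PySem

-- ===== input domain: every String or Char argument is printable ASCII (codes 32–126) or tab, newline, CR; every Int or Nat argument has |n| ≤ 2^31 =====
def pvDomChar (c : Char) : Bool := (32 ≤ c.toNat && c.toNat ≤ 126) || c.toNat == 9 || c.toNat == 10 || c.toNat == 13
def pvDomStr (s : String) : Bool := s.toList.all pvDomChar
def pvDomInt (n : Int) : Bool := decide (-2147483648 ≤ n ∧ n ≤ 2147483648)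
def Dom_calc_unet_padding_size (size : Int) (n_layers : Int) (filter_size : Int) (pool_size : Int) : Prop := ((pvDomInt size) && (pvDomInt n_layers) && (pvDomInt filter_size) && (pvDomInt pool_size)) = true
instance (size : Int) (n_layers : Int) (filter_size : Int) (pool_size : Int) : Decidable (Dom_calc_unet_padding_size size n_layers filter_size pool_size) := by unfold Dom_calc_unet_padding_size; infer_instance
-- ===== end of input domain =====

-- B replaces A's expanding loop and rounding branch by closed forms (objective: simpler).

-- ===== PORT A =====
-- 'pool_size**(n_layers-1)' is ported as 'pool_size ^ (n_layers-1).toNat'; exact since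
-- Pre_ guarantees n_layers ≥ 1 (in Python a negative exponent leaves the integers).
def calc_unet_padding_size (size : Int) (n_layers : Int) (filter_size : Int) (pool_size : Int) : Int × Int :=
  -- up
  let s1 := (PySem.List.pyRange 0 (n_layers - 1) 1).foldl (fun sp _ =>
      let sp := sp + 2 * (filter_size - 1)
      if PySem.Int.mod sp pool_size = 0 then
        PySem.Int.floordiv sp pool_size + 1
      else
        PySem.Int.floordiv sp pool_size) size
  -- middle
  let s2 := s1 + 2 * (filter_size - 1)
  -- down
  let s3 := (PySem.List.pyRange 0 (n_layers - 1) 1).foldl (fun sp _ =>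
      sp * 2 + 2 * (filter_size - 1)) s2
  -- adjust the size, so that the decimation leaves no remainder
  let decimation_factor := pool_size ^ (n_layers - 1).toNat
  let decimation_fraction := PySem.Int.floordiv s3 decimation_factor
  let decimation_remainder := PySem.Int.mod s3 decimation_factor
  let s4 := if decimation_remainder ≠ 0 then (decimation_fraction + 1) * decimation_factor else s3
  let start := PySem.Int.floordiv (s4 - size) 2
  (start, s4 - (start + size))

-- ===== PORT B =====
-- '2**k' and 'pool_size**k' are ported with '.toNat' on the exponent; exact since Pre_ guarantees k = n_layers-1 ≥ 0.
def calc_unet_padding_size_alt (size : Int) (n_layers : Int) (filter_size : Int) (pool_size : Int) : Int × Int :=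
  let k := n_layers - 1
  let pad := 2 * (filter_size - 1)
  -- contracting path: the divisibility branch prevents a closed form
  let s := (PySem.List.pyRange 0 k 1).foldl (fun s _ =>
      let t := s + pad
      PySem.Int.floordiv t pool_size + (if PySem.Int.mod t pool_size = 0 then 1 else 0)) size
  -- middle + expanding path in closed form
  let factor : Int := 2 ^ k.toNat
  let s2 := (s + pad) * factor + pad * (factor - 1)
  -- round up to the next multiple of the decimation factor (ceiling division)
  let d := pool_size ^ k.toNat
  let s3 := -(PySem.Int.floordiv (-s2) d) * d
  let start := PySem.Int.floordiv (s3 - size) 2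
  (start, s3 - size - start)

-- ===== PRECONDITION & SPEC =====
-- Pre_ excludes n_layers ≤ 0, where A's negative exponent drags the computation through Python
-- floats (float results, outside the declared Int × Int type, on most such inputs), and
-- pool_size = 0 with n_layers ≥ 2, where A raises ZeroDivisionError.
def Pre_calc_unet_padding_size (size : Int) (n_layers : Int) (filter_size : Int) (pool_size : Int) : Prop :=
  1 ≤ n_layers ∧ (pool_size ≠ 0 ∨ n_layers = 1)
instance (size : Int) (n_layers : Int) (filter_size : Int) (pool_size : Int) : Decidable (Pre_calc_unet_padding_size size n_layers filter_size pool_size) := by unfold Pre_calc_unet_padding_size; infer_instance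
def pvWitness_calc_unet_padding_size : Int × Int × Int × Int := (10, 3, 3, 2)

def Spec_calc_unet_padding_size (size : Int) (n_layers : Int) (filter_size : Int) (pool_size : Int) (out : Int × Int) : Prop := out = calc_unet_padding_size_alt size n_layers filter_size pool_size
instance (size : Int) (n_layers : Int) (filter_size : Int) (pool_size : Int) (out : Int × Int) : Decidable (Spec_calc_unet_padding_size size n_layers filter_size pool_size out) := by unfold Spec_calc_unet_padding_size; infer_instance

-- ===== CLAIM (what is proved, stated in full; the proofs are below) =====
def Claim_equal_calc_unet_padding_size : Prop := ∀ (size : Int) (n_layers : Int) (filter_size : Int) (pool_size : Int), Dom_calc_unet_padding_size size n_layers filter_size pool_size → Pre_calc_unet_padding_size size n_layers filter_size pool_size → Spec_calc_unet_padding_size size n_layers filter_size pool_size (calc_unet_padding_size size n_layers filter_size pool_size)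

-- ===== LEMMAS AND PROOFS =====

-- both contracting-loop step functions compute the same value
theorem pvUpStepEq (filter_size pool_size : Int) :
    (fun (sp : Int) (_ : Int) =>
      let sp := sp + 2 * (filter_size - 1)
      if PySem.Int.mod sp pool_size = 0 then
        PySem.Int.floordiv sp pool_size + 1
      else
        PySem.Int.floordiv sp pool_size)
    = (fun (s : Int) (_ : Int) =>
      let t := s + 2 * (filter_size - 1)
      PySem.Int.floordiv t pool_size + (if PySem.Int.mod t pool_size = 0 then 1 else 0)) := by
  funext s _
  by_cases h : PySem.Int.mod (s + 2 * (filter_size - 1)) pool_size = 0 <;> simp [h]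

-- the expanding loop in closed form (the fold ignores its elements; only the length matters)
theorem pvDownClosed (pad : Int) (l : List Int) (init : Int) :
    l.foldl (fun sp _ => sp * 2 + pad) init = init * 2 ^ l.length + pad * (2 ^ l.length - 1) := by
  induction l generalizing init with
  | nil => simp
  | cons a t ih => simp only [List.foldl_cons, ih, List.length_cons, pow_succ]; ring

-- ceiling division -((-s)//d)*d equals A's remainder-tested round-up, for every d ≠ 0
theorem pvCeilRound (s d : Int) (hd : d ≠ 0) :
    (if PySem.Int.mod s d ≠ 0 then (PySem.Int.floordiv s d + 1) * d else s)
      = -(PySem.Int.floordiv (-s) d) * d := by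
  have hq := PySem.Int.floordiv_mul_add_mod s d
  have hq' := PySem.Int.floordiv_mul_add_mod (-s) d
  set q := PySem.Int.floordiv s d with hqdef
  set r := PySem.Int.mod s d with hrdef
  set q' := PySem.Int.floordiv (-s) d with hq'def
  set r' := PySem.Int.mod (-s) d with hr'def
  have hsum : (q + q') * d = -(r + r') := by linear_combination hq + hq'
  by_cases h : r = 0
  · have hr'0 : r' = 0 := by
      rw [hr'def, PySem.Int.mod_eq_zero_iff_dvd]
      exact Dvd.dvd.neg_right ((PySem.Int.mod_eq_zero_iff_dvd s d).mp (hrdef ▸ h))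
    have hqq : q + q' = 0 := by
      have h0 : (q + q') * d = 0 := by rw [hsum, h, hr'0]; ring
      rcases mul_eq_zero.mp h0 with h1 | h1
      · exact h1
      · exact absurd h1 hd
    simp only [h, ne_eq, not_true_eq_false, if_false]
    have : q' = -q := by omega
    rw [this, ← hq, h]; ring
  · have hr' : r' ≠ 0 := by
      intro h0
      apply h
      rw [hrdef, PySem.Int.mod_eq_zero_iff_dvd]
      have := (PySem.Int.mod_eq_zero_iff_dvd (-s) d).mp (hr'def ▸ h0)
      simpa using this.neg_right
    have key : q + q' = -1 := by
      rcases lt_or_gt_of_ne hd with hneg | hpos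
      · have hb1 := PySem.Int.mod_neg_bounds (a := s) hneg
        have hb2 := PySem.Int.mod_neg_bounds (a := -s) hneg
        rw [← hrdef] at hb1; rw [← hr'def] at hb2
        have hr0 : r < 0 := lt_of_le_of_ne hb1.2 h
        have hr'0 : r' < 0 := lt_of_le_of_ne hb2.2 hr'
        by_contra hne
        rcases (by omega : q + q' ≤ -2 ∨ 0 ≤ q + q') with h1 | h1
        · nlinarith [hsum]
        · nlinarith [hsum, mul_nonpos_of_nonneg_of_nonpos h1 hneg.le]
      · have hb1l := PySem.Int.mod_nonneg (a := s) hpos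
        have hb1r := PySem.Int.mod_lt (a := s) hpos
        have hb2l := PySem.Int.mod_nonneg (a := -s) hpos
        have hb2r := PySem.Int.mod_lt (a := -s) hpos
        rw [← hrdef] at hb1l hb1r; rw [← hr'def] at hb2l hb2r
        have hr0 : 0 < r := lt_of_le_of_ne hb1l (Ne.symm h)
        have hr'0 : 0 < r' := lt_of_le_of_ne hb2l (Ne.symm hr')
        by_contra hne
        rcases (by omega : q + q' ≤ -2 ∨ 0 ≤ q + q') with h1 | h1
        · nlinarith [hsum]
        · nlinarith [hsum, mul_nonneg h1 hpos.le]
    simp only [h, ne_eq, not_false_eq_true, if_true]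
    linear_combination d * key

-- ===== VERDICT (by name: the statement is the Claim_ definition above) =====
theorem calc_unet_padding_size_spec : Claim_equal_calc_unet_padding_size := by
  intro size n_layers filter_size pool_size _ hpre
  obtain ⟨hn, hp⟩ := hpre
  unfold Spec_calc_unet_padding_size calc_unet_padding_size calc_unet_padding_size_alt
  simp only []
  have hd : pool_size ^ (n_layers - 1).toNat ≠ 0 := by
    rcases hp with hp | hp
    · exact pow_ne_zero _ hp
    · subst hp; norm_num
  -- name the common contracting-path result
  rw [pvUpStepEq filter_size pool_size]
  set s := (PySem.List.pyRange 0 (n_layers - 1) 1).foldl (fun s _ =>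
      let t := s + 2 * (filter_size - 1)
      PySem.Int.floordiv t pool_size + (if PySem.Int.mod t pool_size = 0 then 1 else 0)) size with hs
  have hlen : (PySem.List.pyRange 0 (n_layers - 1) 1).length = (n_layers - 1).toNat := by
    rw [PySem.List.length_pyRange_one]; congr 1; omega
  rw [pvDownClosed, hlen]
  set s2 := (s + 2 * (filter_size - 1)) * 2 ^ (n_layers - 1).toNat
      + 2 * (filter_size - 1) * (2 ^ (n_layers - 1).toNat - 1) with hs2
  have hround := pvCeilRound s2 (pool_size ^ (n_layers - 1).toNat) hd
  rw [← hround]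
  by_cases hrem : PySem.Int.mod s2 (pool_size ^ (n_layers - 1).toNat) = 0 <;>
    simp only [hrem, ne_eq, not_true_eq_false, not_false_eq_true, if_true, if_false] <;>
    simp only [Prod.mk.injEq] <;> exact ⟨trivial, by ring⟩
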